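-- pv_equiv track=rewrite | github.com/horacecc/algorithm | LeetCode/3839.py | prefixConnected
-- ===== SOURCE A (Python) =====
-- from typing import List
--
-- def prefixConnected(words: List[str], k: int) -> int:
--     d = {}
--     for word in words:
--         if len(word) < k:
--             continue
--         pre = word[0:k]
--         if pre not in d:
--             d[pre] = 0
--         d[pre] += 1
--     return sum(v >= 2 for v in d.values())
-- ===== SOURCE B (Python) =====
-- from typing import List
--
-- def prefixConnected(words: List[str], k: int) -> int:
--     ps = sorted(w[0:k] for w in words if len(w) >= k)
--     ans = 0
--     i = 0
--     n = len(ps)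
--     while i < n:
--         j = i + 1
--         while j < n and ps[j] == ps[i]:
--             j += 1
--         if j - i >= 2:
--             ans += 1
--         i = j
--     return ans
-- ===== Notes on version B (the rewrite author's own statement) =====
-- stated objective: alternative
-- what changed: Replaces A's dict-of-counts grouping (hash counter, then sum over values) by building the list of length-k prefixes, sorting it, and linearly scanning for runs of adjacent equal prefixes of length >= 2.
import Mathlib
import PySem

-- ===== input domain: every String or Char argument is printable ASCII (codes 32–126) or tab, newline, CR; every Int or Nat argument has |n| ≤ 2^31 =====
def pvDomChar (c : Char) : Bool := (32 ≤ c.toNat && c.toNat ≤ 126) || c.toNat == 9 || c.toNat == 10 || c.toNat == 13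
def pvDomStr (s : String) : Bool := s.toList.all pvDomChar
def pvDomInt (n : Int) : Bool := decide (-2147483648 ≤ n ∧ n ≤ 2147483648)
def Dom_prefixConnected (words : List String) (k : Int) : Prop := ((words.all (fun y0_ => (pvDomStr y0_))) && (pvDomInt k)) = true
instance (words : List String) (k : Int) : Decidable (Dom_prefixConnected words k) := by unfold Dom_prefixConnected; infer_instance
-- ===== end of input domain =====

-- B replaces A's dict-of-counts grouping by sort-then-scan of adjacent equal prefixes (alternative algorithm, same result).

-- ===== PORT A =====
-- literal port of A: a dict counting each length-k prefix, then sum(v >= 2 for v in d.values())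
def prefixConnected (words : List String) (k : Int) : Int :=
  let d := words.foldl (fun d word =>
    if PySem.Str.len word < k then d
    else
      let pre := PySem.Str.slice word (some 0) (some k)
      let d := if d.contains pre = false then d.insert pre (0 : Int) else d
      d.insert pre (d.getD pre 0 + 1)) PySem.Dict.empty
  (d.values.map (fun v => if 2 ≤ v then (1 : Int) else 0)).sum

-- ===== PORT B =====
-- inner while loop of Source B: length of the run of elements equal to x, plus the remaining suffix
def pvRunLen (x : String) : List String → Nat × List String
  | [] => (0, [])
  | y :: ys => if y = x then ((pvRunLen x ys).1 + 1, (pvRunLen x ys).2) else (0, y :: ys)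

theorem pvRunLen_length_le (x : String) : ∀ (l : List String), (pvRunLen x l).2.length ≤ l.length
  | [] => Nat.le_refl _
  | y :: ys => by
    by_cases h : y = x <;> simp [pvRunLen, h]
    exact Nat.le_succ_of_le (pvRunLen_length_le x ys)

-- outer while loop of Source B: count the runs of length ≥ 2 in the sorted prefix list
def pvCountRuns : List String → Int
  | [] => 0
  | x :: rest =>
    (if 2 ≤ (pvRunLen x rest).1 + 1 then (1 : Int) else 0) + pvCountRuns (pvRunLen x rest).2
  termination_by l => l.length
  decreasing_by exact Nat.lt_succ_of_le (pvRunLen_length_le _ _)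

def prefixConnected_alt (words : List String) (k : Int) : Int :=
  let ps := words.filterMap (fun w =>
    if k ≤ PySem.Str.len w then some (PySem.Str.slice w (some 0) (some k)) else none)
  pvCountRuns (PySem.List.sorted ps (fun x => x) false)

-- ===== PRECONDITION & SPEC =====
def Spec_prefixConnected (words : List String) (k : Int) (out : Int) : Prop := out = prefixConnected_alt words k
instance (words : List String) (k : Int) (out : Int) : Decidable (Spec_prefixConnected words k out) := by unfold Spec_prefixConnected; infer_instance

-- ===== CLAIM (what is proved, stated in full; the proofs are below) =====
def Claim_equal_prefixConnected : Prop := ∀ (words : List String) (k : Int), Dom_prefixConnected words k → Spec_prefixConnected words k (prefixConnected words k)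

-- ===== LEMMAS AND PROOFS =====

-- the list of length-k prefixes both programs group (proof-side abbreviation)
def pvPrefixes (words : List String) (k : Int) : List String :=
  words.filterMap (fun w =>
    if k ≤ PySem.Str.len w then some (PySem.Str.slice w (some 0) (some k)) else none)

-- A's per-word dict step is exactly the counter step
theorem pvStepA_eq_counterStep (d : PySem.Dict String Int) (x : String) :
    (let d' := if d.contains x = false then d.insert x (0 : Int) else d
     d'.insert x (d'.getD x 0 + 1)) = d.insert x (d.getD x 0 + 1) := by
  by_cases h : d.contains x = false
  · simp only [h, if_true]
    rw [PySem.Dict.getD_insert_self, PySem.Dict.insert_insert_self,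
      PySem.Dict.getD_of_not_contains d 0 h]
  · simp [h]

-- A's whole fold builds the counter of the prefix list
theorem pvFoldA_eq_counter (words : List String) (k : Int) :
    words.foldl (fun d word =>
      if PySem.Str.len word < k then d
      else
        let pre := PySem.Str.slice word (some 0) (some k)
        let d := if d.contains pre = false then d.insert pre (0 : Int) else d
        d.insert pre (d.getD pre 0 + 1)) PySem.Dict.empty
    = PySem.Dict.counter (pvPrefixes words k) := by
  rw [← PySem.Dict.foldl_insert_getD_add_one_eq_counter, pvPrefixes, List.foldl_filterMap]
  congr 1
  funext d w
  by_cases h : PySem.Str.len w < k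
  · rw [if_pos h, if_neg (show ¬ k ≤ PySem.Str.len w from by omega)]
  · rw [if_neg h, if_pos (show k ≤ PySem.Str.len w from by omega)]
    exact pvStepA_eq_counterStep d _

-- pvRunLen splits off a maximal run: l = x^n ++ r with r not starting with x
theorem pvRunLen_eq (x : String) : ∀ (l : List String),
    List.replicate (pvRunLen x l).1 x ++ (pvRunLen x l).2 = l
  | [] => rfl
  | y :: ys => by
    by_cases h : y = x
    · simp only [pvRunLen, h, if_true, List.replicate_succ, List.cons_append]
      rw [pvRunLen_eq x ys]
    · simp [pvRunLen, h]

theorem pvRunLen_head_ne (x : String) : ∀ (l : List String) (h : String) (t : List String),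
    (pvRunLen x l).2 = h :: t → h ≠ x
  | [], h, t => by simp [pvRunLen]
  | y :: ys, h, t => by
    by_cases hyx : y = x
    · simpa [pvRunLen, hyx] using pvRunLen_head_ne x ys h t
    · simp only [pvRunLen, hyx, if_false]
      rintro ⟨rfl, -⟩
      exact hyx

-- the run-scan of a ≤-sorted list counts the distinct elements of multiplicity ≥ 2
theorem pvCountRuns_sorted_aux : ∀ (N : Nat) (l : List String), l.length ≤ N →
    l.Pairwise (· ≤ ·) →
    pvCountRuns l = ((PySem.Set.ofList l).countP (fun p => decide (2 ≤ l.count p)) : Int) := by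
  intro N
  induction N with
  | zero =>
    intro l hlen _
    have : l = [] := List.eq_nil_of_length_eq_zero (Nat.le_zero.mp hlen)
    subst this
    simp [pvCountRuns, PySem.Set.ofList]
  | succ N ih =>
    intro l hlen hs
    cases l with
    | nil => simp [pvCountRuns, PySem.Set.ofList]
    | cons x rest =>
      obtain ⟨n, r, hnr⟩ : ∃ n r, pvRunLen x rest = (n, r) := ⟨_, _, rfl⟩
      have hrest : List.replicate n x ++ r = rest := by
        simpa [hnr] using pvRunLen_eq x rest
      have hxle : ∀ y ∈ rest, x ≤ y := (List.pairwise_cons.mp hs).1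
      have hpr : rest.Pairwise (· ≤ ·) := (List.pairwise_cons.mp hs).2
      have hr_sub : r.Sublist rest := by
        rw [← hrest]; exact List.sublist_append_right _ _
      have hr_pair : r.Pairwise (· ≤ ·) := hpr.sublist hr_sub
      have hxnotr : x ∉ r := by
        intro hx
        cases r with
        | nil => simp at hx
        | cons h t =>
          have hne : h ≠ x := pvRunLen_head_ne x rest h t (by rw [hnr])
          have hxh : x ≤ h := hxle h (hr_sub.mem (by simp))
          rcases List.mem_cons.mp hx with hxeq | hxt
          · exact hne hxeq.symm
          · have hhx : h ≤ x := List.rel_of_pairwise_cons hr_pair hxt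
            exact hne (le_antisymm hhx hxh)
      -- counts in the whole list
      have hcx : (x :: rest).count x = n + 1 := by
        rw [← hrest]
        simp [List.count_append,
          List.count_eq_zero_of_not_mem hxnotr]
      have hcy : ∀ y ∈ r, (x :: rest).count y = r.count y := by
        intro y hy
        have hyx : y ≠ x := fun h => hxnotr (h ▸ hy)
        rw [← hrest]
        simp [List.count_append, List.count_replicate, Ne.symm hyx]
      -- the distinct elements are x plus those of r
      have hnodup2 : (x :: PySem.Set.ofList r).Nodup := by
        refine List.nodup_cons.mpr ⟨?_, PySem.Set.nodup_ofList r⟩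
        rw [PySem.Set.mem_ofList]; exact hxnotr
      have hperm : (PySem.Set.ofList (x :: rest)).Perm (x :: PySem.Set.ofList r) := by
        rw [List.perm_ext_iff_of_nodup (PySem.Set.nodup_ofList _) hnodup2]
        intro a
        simp only [PySem.Set.mem_ofList, List.mem_cons, ← hrest, List.mem_append,
          List.mem_replicate]
        tauto
      -- unfold one outer-loop step of pvCountRuns
      have hstep : pvCountRuns (x :: rest)
          = (if 2 ≤ n + 1 then (1 : Int) else 0) + pvCountRuns r := by
        rw [pvCountRuns]; rw [hnr]
      have hrlen : r.length ≤ N := by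
        have h1 : r.length ≤ rest.length := by
          have := pvRunLen_length_le x rest; rw [hnr] at this; exact this
        have h2 : rest.length ≤ N := by simpa using Nat.lt_succ_iff.mp (Nat.lt_of_lt_of_le (by simp) hlen)
        omega
      have hIH := ih r hrlen hr_pair
      rw [hstep, hIH, hperm.countP_eq, List.countP_cons]
      have hcongr : (PySem.Set.ofList r).countP (fun p => decide (2 ≤ (x :: rest).count p))
          = (PySem.Set.ofList r).countP (fun p => decide (2 ≤ r.count p)) := by
        apply List.countP_congr
        intro y hy
        rw [PySem.Set.mem_ofList] at hy
        simp [hcy y hy]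
      rw [hcongr, hcx]
      by_cases h2 : 2 ≤ n + 1
      · simp only [if_pos h2, decide_eq_true_eq]; push_cast; omega
      · simp [h2]

theorem pvCountRuns_sorted (l : List String) (hs : l.Pairwise (· ≤ ·)) :
    pvCountRuns l = ((PySem.Set.ofList l).countP (fun p => decide (2 ≤ l.count p)) : Int) :=
  pvCountRuns_sorted_aux l.length l (Nat.le_refl _) hs

theorem prefixConnected_eq (words : List String) (k : Int) :
    prefixConnected words k = prefixConnected_alt words k := by
  unfold prefixConnected prefixConnected_alt
  rw [pvFoldA_eq_counter]
  show (List.map (fun v => if 2 ≤ v then (1 : Int) else 0)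
      (PySem.Dict.counter (pvPrefixes words k)).values).sum
    = pvCountRuns (PySem.List.sorted (pvPrefixes words k) (fun x => x) false)
  set ps := pvPrefixes words k with hps
  -- A side: values of the counter, summed as 0/1
  have hvals : (PySem.Dict.counter ps).values
      = (PySem.Set.ofList ps).map (fun p => ((ps.count p : Nat) : Int)) := by
    show ((PySem.Dict.counter ps).items).map (·.2) = _
    rw [PySem.Dict.items_counter]
    simp [List.map_map, Function.comp]
  rw [hvals, List.map_map]
  have hfun : ((fun v => if 2 ≤ v then (1 : Int) else 0) ∘ fun p => ((ps.count p : Nat) : Int))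
      = fun p => if (fun p => decide (2 ≤ ps.count p)) p = true then (1 : Int) else 0 := by
    funext p
    by_cases h : 2 ≤ ps.count p
    · simp [h]
    · simp [h, Function.comp]
  rw [hfun, PySem.List.sum_map_ite_one_zero]
  -- B side: run-scan of the sorted prefixes
  have hsorted : (PySem.List.sorted ps (fun x => x) false).Pairwise (· ≤ ·) :=
    PySem.List.sorted_pairwise ps (fun x => x)
  rw [pvCountRuns_sorted _ hsorted]
  have hperm : (PySem.List.sorted ps (fun x => x) false).Perm ps :=
    PySem.List.sorted_perm ps (fun x => x) false
  have hpred : (fun p => decide (2 ≤ (PySem.List.sorted ps (fun x => x) false).count p))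
      = fun p => decide (2 ≤ ps.count p) := by
    funext p; rw [hperm.count_eq]
  have hsetperm : (PySem.Set.ofList (PySem.List.sorted ps (fun x => x) false)).Perm
      (PySem.Set.ofList ps) := by
    rw [List.perm_ext_iff_of_nodup (PySem.Set.nodup_ofList _) (PySem.Set.nodup_ofList _)]
    intro a
    rw [PySem.Set.mem_ofList, PySem.Set.mem_ofList, hperm.mem_iff]
  rw [hpred, hsetperm.countP_eq]

-- ===== VERDICT (by name: the statement is the Claim_ definition above) =====
theorem prefixConnected_spec : Claim_equal_prefixConnected := by
  intro words k _
  exact prefixConnected_eq words k
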